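-- pv_equiv track=rewrite | github.com/Caeta-ok/TimeAdministrator | main.py | labelInList
-- ===== SOURCE A (Python) =====
-- def labelInList(string, label_list):
--     # Detect if a substring comma separated in list and returns True
--     if str(string) != "nan":
--         for s in string.split(","):
--             if s in label_list:
--                 return True # If data it's in label list
--         return False # If data it's not in label_list
--     else:
--         return False # If data is nan
-- ===== SOURCE B (Python) =====
-- def labelInList(string, label_list):
--     # Streaming tokenizer: peel one comma-token at a time with str.partition,
--     # checking each token as it is produced; never materializes the parts list.
--     if str(string) == "nan":
--         return False
--     rest = string
--     while True:
--         head, sep, tail = rest.partition(",")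
--         if head in label_list:
--             return True
--         if not sep:
--             return False
--         rest = tail
-- ===== Notes on version B (the rewrite author's own statement) =====
-- stated objective: alternative
-- what changed: Replaces split-into-a-list-then-scan by a streaming tokenizer: a partition-based loop that peels one comma-delimited token at a time from the remaining string and tests it immediately, so no list of parts is ever built.
import Mathlib
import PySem

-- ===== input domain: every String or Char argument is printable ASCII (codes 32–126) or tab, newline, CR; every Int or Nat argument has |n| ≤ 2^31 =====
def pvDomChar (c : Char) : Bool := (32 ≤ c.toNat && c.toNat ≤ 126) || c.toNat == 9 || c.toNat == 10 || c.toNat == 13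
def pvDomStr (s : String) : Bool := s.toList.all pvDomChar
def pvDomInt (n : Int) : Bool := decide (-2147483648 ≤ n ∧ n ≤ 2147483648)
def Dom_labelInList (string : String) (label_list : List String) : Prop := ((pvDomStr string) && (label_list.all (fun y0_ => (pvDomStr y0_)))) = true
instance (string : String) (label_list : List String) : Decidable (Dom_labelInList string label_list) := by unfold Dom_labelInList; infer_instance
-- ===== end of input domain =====

-- B streams comma-tokens with a partition-based loop instead of building the split list and scanning it (alternative decomposition, same cost).
-- ===== PORT A =====
def labelInListLoop (label_list : List String) : List String → Bool
  | [] => false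
  | s :: rest => if s ∈ label_list then true else labelInListLoop label_list rest

def labelInList (string : String) (label_list : List String) : Bool :=
  if string ≠ "nan" then labelInListLoop label_list (((PySem.Str.split? string ",").getD []))
  else false

-- ===== PORT B =====
-- faithful port of Source B's while-loop over rest.partition(","): head = chars before the
-- first ',' (all of rest if none), and the loop continues on the tail after that ','.
def labelInListAltGo (label_list : List String) (rest : List Char) : Bool :=
  if String.ofList (rest.takeWhile (· ≠ ',')) ∈ label_list then true
  else if hr : rest.dropWhile (· ≠ ',') = [] then false
  else labelInListAltGo label_list (rest.dropWhile (· ≠ ',')).tail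
termination_by rest.length
decreasing_by
  have h1 : (rest.dropWhile (· ≠ ',')).length ≤ rest.length := List.length_dropWhile_le _ _
  have h3 : ((rest.dropWhile (· ≠ ',')).tail).length = (rest.dropWhile (· ≠ ',')).length - 1 :=
    List.length_tail
  have h4 : 0 < (rest.dropWhile (· ≠ ',')).length := List.length_pos_of_ne_nil hr
  omega

def labelInList_alt (string : String) (label_list : List String) : Bool :=
  if string = "nan" then false
  else labelInListAltGo label_list string.toList

-- ===== PRECONDITION & SPEC =====
def Spec_labelInList (string : String) (label_list : List String) (out : Bool) : Prop := out = labelInList_alt string label_list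
instance (string : String) (label_list : List String) (out : Bool) : Decidable (Spec_labelInList string label_list out) := by unfold Spec_labelInList; infer_instance

-- ===== CLAIM (what is proved, stated in full; the proofs are below) =====
def Claim_equal_labelInList : Prop := ∀ (string : String) (label_list : List String), Dom_labelInList string label_list → Spec_labelInList string label_list (labelInList string label_list)

-- ===== LEMMAS AND PROOFS =====

-- structural characterisation of comma tokenisation
def pvTok : List Char → List (List Char)
  | [] => [[]]
  | c :: rest => if c = ',' then [] :: pvTok rest else (pvTok rest).modifyHead (c :: ·)

theorem pvTok_ne_nil (cs : List Char) : pvTok cs ≠ [] := by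
  cases cs with
  | nil => simp [pvTok]
  | cons c rest =>
    simp only [pvTok]
    split
    · simp
    · cases h : pvTok rest with
      | nil => exact absurd h (pvTok_ne_nil rest)
      | cons a t => simp

theorem modifyHead_modifyHead {α : Type} (f g : α → α) (l : List α) :
    (l.modifyHead f).modifyHead g = l.modifyHead (fun x => g (f x)) := by
  cases l <;> simp

theorem modifyHead_id' {α : Type} (l : List α) : l.modifyHead (fun x => x) = l := by
  cases l <;> simp

theorem splitOn_go_eq (l : List Char) (cur : List Char) (acc : List (List Char)) (fuel : Nat)
    (hf : l.length ≤ fuel) :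
    PySem.Chars.splitOn.go [','] fuel l cur acc
      = acc.reverse ++ (pvTok l).modifyHead (cur.reverse ++ ·) := by
  induction l generalizing fuel cur acc with
  | nil =>
    cases fuel <;> simp [PySem.Chars.splitOn.go, pvTok]
  | cons c rest ih =>
    cases fuel with
    | zero => simp at hf
    | succ f =>
      simp only [PySem.Chars.splitOn.go]
      by_cases hc : c = ','
      · subst hc
        have hp : [','].isPrefixOf (',' :: rest) = true := by simp [List.isPrefixOf]
        rw [if_pos hp]
        have := ih (fuel := f) (cur := []) (acc := cur.reverse :: acc)
          (by simpa using Nat.le_of_succ_le_succ hf)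
        simp only [List.length_cons, List.length_nil, List.drop_succ_cons, List.drop_zero] at this ⊢
        rw [this]
        simp [pvTok, modifyHead_id']
      · have hp : [','].isPrefixOf (c :: rest) = false := by
          simp [List.isPrefixOf]; exact fun h => absurd h.symm hc
        rw [if_neg (by simp [hp])]
        rw [ih (fuel := f) (cur := c :: cur) (acc := acc) (Nat.le_of_succ_le_succ hf)]
        simp only [pvTok, if_neg hc, modifyHead_modifyHead, List.reverse_cons]
        congr 2
        funext x
        simp

theorem splitOn_comma_eq_pvTok (cs : List Char) :
    PySem.Chars.splitOn cs [','] = pvTok cs := by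
  unfold PySem.Chars.splitOn
  rw [splitOn_go_eq cs [] [] (cs.length + 1) (Nat.le_succ _)]
  simp [modifyHead_id']

theorem pvTok_eq_take_drop (cs : List Char) :
    pvTok cs = cs.takeWhile (· ≠ ',') ::
      (if cs.dropWhile (· ≠ ',') = [] then []
       else pvTok (cs.dropWhile (· ≠ ',')).tail) := by
  induction cs with
  | nil => simp [pvTok]
  | cons c rest ih =>
    by_cases hc : c = ','
    · subst hc; simp [pvTok]
    · simp only [pvTok, if_neg hc, List.takeWhile_cons, List.dropWhile_cons]
      rw [ih]
      simp [hc]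

theorem altGo_eq_loop (ll : List String) (cs : List Char) :
    labelInListAltGo ll cs = labelInListLoop ll ((pvTok cs).map String.ofList) := by
  unfold labelInListAltGo
  rw [pvTok_eq_take_drop]
  simp only [List.map_cons, labelInListLoop]
  by_cases hmem : String.ofList (cs.takeWhile (· ≠ ',')) ∈ ll
  · simp only [if_pos hmem]
  · simp only [if_neg hmem]
    by_cases hr : cs.dropWhile (· ≠ ',') = []
    · simp only [dif_pos hr, if_pos hr, List.map_nil, labelInListLoop]
    · simp only [dif_neg hr, if_neg hr]
      exact altGo_eq_loop ll (cs.dropWhile (· ≠ ',')).tail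
termination_by cs.length
decreasing_by
  simp only [ne_eq, decide_not] at hr ⊢
  have h1 : (List.dropWhile (fun x => !decide (x = ',')) cs).length ≤ cs.length :=
    List.length_dropWhile_le _ _
  have h3 : ((List.dropWhile (fun x => !decide (x = ',')) cs).tail).length
      = (List.dropWhile (fun x => !decide (x = ',')) cs).length - 1 := List.length_tail
  have h4 := List.length_pos_of_ne_nil hr
  omega

-- ===== VERDICT (by name: the statement is the Claim_ definition above) =====
theorem labelInList_spec : Claim_equal_labelInList := by
  intro string label_list _
  unfold Spec_labelInList labelInList labelInList_alt
  by_cases hn : string = "nan"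
  · simp [hn]
  · simp only [hn, ne_eq, not_false_eq_true, if_true, if_false]
    rw [altGo_eq_loop]
    congr 1
    simp [PySem.Str.split?, PySem.Chars.split?, splitOn_comma_eq_pvTok]
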